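-- pv_equiv track=rewrite | github.com/shushantAI/CSL7110-Assignment2 | q3_lsh.py | lsh_candidate_pairs
-- ===== SOURCE A (Python) =====
-- import itertools
--
-- def lsh_candidate_pairs(signatures: dict, b: int, r: int) -> set:
--     """Apply LSH banding to find candidate pairs."""
--     doc_names = list(signatures.keys())
--     candidate_pairs = set()
--     t = len(next(iter(signatures.values())))
--
--     for band_idx in range(b):
--         start = band_idx * r
--         end = start + r
--         buckets = {}
--         for name in doc_names:
--             band_hash = tuple(signatures[name][start:end])
--             buckets.setdefault(band_hash, []).append(name)
--         for bucket in buckets.values():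
--             if len(bucket) > 1:
--                 for pair in itertools.combinations(bucket, 2):
--                     candidate_pairs.add(tuple(sorted(pair)))
--
--     return candidate_pairs
-- ===== SOURCE B (Python) =====
-- def lsh_candidate_pairs(signatures: dict, b: int, r: int) -> set:
--     """Apply LSH banding to find candidate pairs (dict-free first-occurrence scan grouping per band)."""
--     names = list(signatures)
--     pairs = set()
--     for band_idx in range(b):
--         keys = [tuple(signatures[n][band_idx * r: band_idx * r + r]) for n in names]
--         for i in range(len(names)):
--             if keys[i] not in keys[:i]:
--                 group = [names[j] for j in range(i, len(names)) if keys[j] == keys[i]]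
--                 for gi, x in enumerate(group):
--                     for y in group[gi + 1:]:
--                         pairs.add((x, y) if x <= y else (y, x))
--     return pairs
-- ===== Notes on version B (the rewrite author's own statement) =====
-- stated objective: alternative
-- what changed: B drops the hash-dict bucket building (setdefault) and itertools.combinations/sorted entirely: per band it precomputes the band-slice key list once, groups documents by a first-occurrence prefix scan (keys[i] not in keys[:i]) with a comprehension collecting each group, and emits pairs with enumerate/suffix-slice loops and a min/max conditional.
import Mathlib
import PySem

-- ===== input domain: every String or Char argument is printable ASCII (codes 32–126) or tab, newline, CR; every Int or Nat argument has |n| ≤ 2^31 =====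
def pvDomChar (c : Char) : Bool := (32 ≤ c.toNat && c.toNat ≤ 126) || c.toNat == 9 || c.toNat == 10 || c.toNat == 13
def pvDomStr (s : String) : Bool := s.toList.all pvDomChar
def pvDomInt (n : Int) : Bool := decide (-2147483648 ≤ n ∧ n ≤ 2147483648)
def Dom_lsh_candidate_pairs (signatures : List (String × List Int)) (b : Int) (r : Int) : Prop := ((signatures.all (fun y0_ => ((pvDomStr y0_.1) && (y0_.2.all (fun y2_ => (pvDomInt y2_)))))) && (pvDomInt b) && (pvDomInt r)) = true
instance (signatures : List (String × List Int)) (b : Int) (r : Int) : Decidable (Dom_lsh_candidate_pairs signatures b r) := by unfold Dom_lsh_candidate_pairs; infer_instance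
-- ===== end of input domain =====

-- B replaces A's hash-dict bucket building (setdefault + itertools.combinations + sorted) by a dict-free
-- first-occurrence scan grouping per band with enumerate/suffix-slice emission; an alternative decomposition.

-- ===== PORT A =====
-- itertools.combinations(bucket, 2): hand port, exact (pairs in itertools order)
def pvComb2 {α : Type} : List α → List (α × α)
  | [] => []
  | x :: xs => xs.map (fun y => (x, y)) ++ pvComb2 xs

-- tuple(sorted(pair)) on a 2-tuple of strings: exact (a stable sort of two elements)
def pvSortPair (p : String × String) : String × String :=
  if p.1 ≤ p.2 then p else (p.2, p.1)

-- 't = len(next(iter(signatures.values())))' only raises StopIteration on an empty dict (excluded by Pre_);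
-- its value is never used, so it does not appear below.
def lsh_candidate_pairs (signatures : List (String × List Int)) (b : Int) (r : Int) : List (String × String) :=
  let doc_names : List String := PySem.Set.ofList (signatures.map (fun p => p.1))
  let candidate_pairs : PySem.Set (String × String) := PySem.Set.empty
  (PySem.List.pyRange 0 b 1).foldl (fun cp band_idx =>
    let start := band_idx * r
    let stop := start + r
    let buckets : PySem.Dict (List Int) (List String) :=
      doc_names.foldl (fun bk name =>
        let band_hash := PySem.List.slice ((List.lookup name signatures).getD []) (some start) (some stop)
        bk.modify band_hash [] (fun l => l ++ [name])) PySem.Dict.empty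
    buckets.values.foldl (fun cp bucket =>
      if bucket.length > 1 then
        (pvComb2 bucket).foldl (fun cp pair => PySem.Set.add cp (pvSortPair pair)) cp
      else cp) cp) candidate_pairs

-- ===== PORT B =====
def lsh_candidate_pairs_alt (signatures : List (String × List Int)) (b : Int) (r : Int) : List (String × String) :=
  let names : List String := PySem.Set.ofList (signatures.map (fun p => p.1))
  (PySem.List.pyRange 0 b 1).foldl (fun pairs band_idx =>
    let keys : List (List Int) := names.map (fun n =>
      PySem.List.slice ((List.lookup n signatures).getD []) (some (band_idx * r)) (some (band_idx * r + r)))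
    (PySem.List.pyRange 0 (names.length : Int) 1).foldl (fun pairs i =>
      if ((PySem.List.slice keys none (some i)).contains (PySem.List.pyGetD keys i [])) = false then
        let group : List String :=
          ((PySem.List.pyRange i (names.length : Int) 1).filter (fun j =>
            PySem.List.pyGetD keys j [] == PySem.List.pyGetD keys i [])).map (fun j =>
              PySem.List.pyGetD names j "")
        (PySem.List.enumerate group 0).foldl (fun pairs p =>
          (PySem.List.slice group (some (p.1 + 1)) none).foldl (fun pairs y =>
            PySem.Set.add pairs (if p.2 ≤ y then (p.2, y) else (y, p.2))) pairs) pairs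
      else pairs) pairs) PySem.Set.empty

-- ===== PRECONDITION & SPEC =====
-- Pre_ excludes only the empty dict, on which A raises StopIteration (B naturally returns the empty set there).
def Pre_lsh_candidate_pairs (signatures : List (String × List Int)) (b : Int) (r : Int) : Prop :=
  signatures ≠ []
instance (signatures : List (String × List Int)) (b : Int) (r : Int) : Decidable (Pre_lsh_candidate_pairs signatures b r) := by unfold Pre_lsh_candidate_pairs; infer_instance

def pvWitness_lsh_candidate_pairs : (List (String × List Int)) × Int × Int :=
  ([("a", [1, 2]), ("b", [1, 3])], 2, 1)

def Spec_lsh_candidate_pairs (signatures : List (String × List Int)) (b : Int) (r : Int) (out : List (String × String)) : Prop := out = lsh_candidate_pairs_alt signatures b r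
instance (signatures : List (String × List Int)) (b : Int) (r : Int) (out : List (String × String)) : Decidable (Spec_lsh_candidate_pairs signatures b r out) := by unfold Spec_lsh_candidate_pairs; infer_instance

-- ===== CLAIM (what is proved, stated in full; the proofs are below) =====
def Claim_equal_lsh_candidate_pairs : Prop := ∀ (signatures : List (String × List Int)) (b : Int) (r : Int), Dom_lsh_candidate_pairs signatures b r → Pre_lsh_candidate_pairs signatures b r → Spec_lsh_candidate_pairs signatures b r (lsh_candidate_pairs signatures b r)

-- ===== LEMMAS AND PROOFS =====

-- the build-loop shape of A's buckets:  d[k] = d.get(k, []) + [name]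
def pvBuild {κ : Type} [BEq κ] (l : List (κ × String)) (d : PySem.Dict κ (List String)) : PySem.Dict κ (List String) :=
  l.foldl (fun d p => d.modify p.1 [] (fun bl => bl ++ [p.2])) d

-- A's per-bucket emission (guard + combinations + sorted pair)
def pvEmitA (cp : PySem.Set (String × String)) (bucket : List String) : PySem.Set (String × String) :=
  if bucket.length > 1 then
    (pvComb2 bucket).foldl (fun cp pair => PySem.Set.add cp (pvSortPair pair)) cp
  else cp

-- B's per-bucket emission (enumerate + suffix slice + conditional swap)
def pvEmitB (cp : PySem.Set (String × String)) (bucket : List String) : PySem.Set (String × String) :=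
  (PySem.List.enumerate bucket 0).foldl (fun cp p =>
    (PySem.List.slice bucket (some (p.1 + 1)) none).foldl (fun cp y =>
      PySem.Set.add cp (if p.2 ≤ y then (p.2, y) else (y, p.2))) cp) cp

-- B's band body, abstracted over the band's key function
def pvBandB (h : String → List Int) (ns : List String) (cp : PySem.Set (String × String)) : PySem.Set (String × String) :=
  let keys := ns.map h
  (PySem.List.pyRange 0 (ns.length : Int) 1).foldl (fun pairs i =>
    if ((PySem.List.slice keys none (some i)).contains (PySem.List.pyGetD keys i [])) = false then
      pvEmitB pairs (((PySem.List.pyRange i (ns.length : Int) 1).filter (fun j =>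
        PySem.List.pyGetD keys j [] == PySem.List.pyGetD keys i [])).map (fun j =>
          PySem.List.pyGetD ns j ""))
    else pairs) cp

-- the keys of suf that are fresh w.r.t. seen, in first-occurrence order
def pvFresh {α : Type} [BEq α] : List α → List α → List α
  | _, [] => []
  | seen, c :: cs => if seen.contains c then pvFresh seen cs else c :: pvFresh (seen ++ [c]) cs

-- B's groups, recursively: pre is the already-scanned prefix
def pvGroups (h : String → List Int) : List String → List String → List (List String)
  | _, [] => []
  | pre, n :: rest =>
    if (pre.map h).contains (h n) then pvGroups h (pre ++ [n]) rest
    else (n :: rest.filter (fun m => h m == h n)) :: pvGroups h (pre ++ [n]) rest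

theorem pv_getD_mid {α : Type} : ∀ (p : List α) (x : α) (s : List α) (d : α), (p ++ x :: s).getD p.length d = x := by
  intro p
  induction p with
  | nil => intros; rfl
  | cons a p ih => intro x s d; simpa using ih x s d

theorem pv_update_fresh {α : Type} [BEq α] : ∀ (cs seen : List α),
    PySem.Set.update seen cs = seen ++ pvFresh seen cs := by
  intro cs
  induction cs with
  | nil => intro seen; simp [pvFresh, PySem.Set.update]
  | cons c cs ih =>
    intro seen
    have h1 : PySem.Set.update seen (c :: cs) = PySem.Set.update (PySem.Set.add seen c) cs := rfl
    by_cases hc : seen.contains c = true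
    · have hadd : PySem.Set.add seen c = seen := by
        simp [PySem.Set.add, PySem.Set.contains, hc]
      rw [h1, hadd, ih, pvFresh, if_pos hc]
    · have hadd : PySem.Set.add seen c = seen ++ [c] := by
        simp [PySem.Set.add, PySem.Set.contains, hc]
      rw [h1, hadd, ih, pvFresh, if_neg hc]
      simp

theorem pv_fresh_not_mem {α : Type} [BEq α] [LawfulBEq α] : ∀ (cs seen : List α) (c : α),
    c ∈ pvFresh seen cs → c ∉ seen := by
  intro cs
  induction cs with
  | nil => intro seen c hc; simp [pvFresh] at hc
  | cons c0 cs ih =>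
    intro seen c hc
    rw [pvFresh] at hc
    by_cases h0 : seen.contains c0 = true
    · rw [if_pos h0] at hc
      exact ih seen c hc
    · rw [if_neg h0] at hc
      rcases List.mem_cons.mp hc with rfl | hmem
      · exact fun hin => h0 (List.contains_iff_mem.mpr hin)
      · intro hin
        exact ih (seen ++ [c0]) c hmem (List.mem_append_left _ hin)

theorem pv_fresh_congr {α : Type} [BEq α] [LawfulBEq α] : ∀ (cs seen₁ seen₂ : List α),
    (∀ x, x ∈ seen₁ ↔ x ∈ seen₂) → pvFresh seen₁ cs = pvFresh seen₂ cs := by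
  intro cs
  induction cs with
  | nil => intros; rfl
  | cons c cs ih =>
    intro s1 s2 hmem
    have hc : s1.contains c = s2.contains c := by
      by_cases hm : c ∈ s1
      · rw [List.contains_iff_mem.mpr hm, List.contains_iff_mem.mpr ((hmem c).mp hm)]
      · have e1 : s1.contains c = false := by
          cases hb : s1.contains c
          · rfl
          · exact absurd (List.contains_iff_mem.mp hb) hm
        have e2 : s2.contains c = false := by
          cases hb : s2.contains c
          · rfl
          · exact absurd ((hmem c).mpr (List.contains_iff_mem.mp hb)) hm
        rw [e1, e2]
    rw [pvFresh, pvFresh, hc]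
    by_cases h2 : s2.contains c = true
    · rw [if_pos h2, if_pos h2]
      exact ih s1 s2 hmem
    · rw [if_neg h2, if_neg h2]
      refine congrArg _ (ih (s1 ++ [c]) (s2 ++ [c]) ?_)
      intro x
      simp [hmem x]

theorem pv_groups_fresh (h : String → List Int) : ∀ (suf pre : List String),
    pvGroups h pre suf = (pvFresh (pre.map h) (suf.map h)).map (fun c => suf.filter (fun n => h n == c)) := by
  intro suf
  induction suf with
  | nil => intro pre; rfl
  | cons n rest ih =>
    intro pre
    rw [pvGroups, List.map_cons, pvFresh]
    by_cases hc : (pre.map h).contains (h n) = true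
    · rw [if_pos hc, if_pos hc, ih (pre ++ [n])]
      have hfc : pvFresh ((pre ++ [n]).map h) (rest.map h) = pvFresh (pre.map h) (rest.map h) := by
        apply pv_fresh_congr
        intro x
        simp only [List.map_append, List.map_cons, List.map_nil, List.mem_append, List.mem_cons,
          List.not_mem_nil, or_false]
        constructor
        · rintro (hx | rfl)
          · exact hx
          · exact List.contains_iff_mem.mp hc
        · exact Or.inl
      rw [hfc]
      apply List.map_congr_left
      intro c hcmem
      have hnotpre : c ∉ pre.map h := pv_fresh_not_mem _ _ _ hcmem
      have hne : h n ≠ c := by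
        intro he
        exact hnotpre (he ▸ List.contains_iff_mem.mp hc)
      rw [List.filter_cons, if_neg (by simp [beq_eq_false_iff_ne.mpr hne])]
    · rw [if_neg hc, if_neg hc, List.map_cons, ih (pre ++ [n])]
      have hhead : (n :: rest).filter (fun m => h m == h n) = n :: rest.filter (fun m => h m == h n) := by
        rw [List.filter_cons, if_pos (by simp)]
      rw [hhead]
      refine congrArg _ ?_
      have hmapeq : (pre ++ [n]).map h = pre.map h ++ [h n] := by simp
      rw [hmapeq]
      apply List.map_congr_left
      intro c hcmem
      have hnot : c ∉ pre.map h ++ [h n] := pv_fresh_not_mem _ _ _ hcmem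
      have hne : h n ≠ c := by
        intro he
        exact hnot (he ▸ List.mem_append_right _ (List.mem_singleton.mpr rfl))
      rw [List.filter_cons, if_neg (by simp [beq_eq_false_iff_ne.mpr hne])]

theorem pv_idx (h : String → List Int) (P : List Int → Bool) : ∀ (suf pre : List String),
    ((PySem.List.pyRange (pre.length : Int) ((pre ++ suf).length : Int) 1).filter (fun j =>
        P (PySem.List.pyGetD ((pre ++ suf).map h) j []))).map (fun j => PySem.List.pyGetD (pre ++ suf) j "")
      = suf.filter (fun m => P (h m)) := by
  intro suf
  induction suf with
  | nil =>
    intro pre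
    rw [PySem.List.pyRange_one_eq_nil (by simp)]
    rfl
  | cons n rest ih =>
    intro pre
    have hlt : (pre.length : Int) < ((pre ++ n :: rest).length : Int) := by
      simp
    rw [PySem.List.pyRange_one_cons hlt, List.filter_cons]
    have hgetk : PySem.List.pyGetD ((pre ++ n :: rest).map h) (pre.length : Int) [] = h n := by
      rw [PySem.List.pyGetD_natCast, show (pre ++ n :: rest).map h = pre.map h ++ h n :: rest.map h from by simp,
        show pre.length = (pre.map h).length from by simp]
      exact pv_getD_mid _ _ _ _
    have hgetn : PySem.List.pyGetD (pre ++ n :: rest) (pre.length : Int) "" = n := by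
      rw [PySem.List.pyGetD_natCast]
      exact pv_getD_mid _ _ _ _
    have hlist : pre ++ n :: rest = (pre ++ [n]) ++ rest := by simp
    have hcast : (pre.length : Int) + 1 = ((pre ++ [n]).length : Int) := by simp
    rw [hgetk]
    by_cases hp : P (h n) = true
    · rw [if_pos hp, List.map_cons, hgetn, List.filter_cons, if_pos hp]
      refine congrArg _ ?_
      rw [hcast, hlist]
      exact ih (pre ++ [n])
    · rw [if_neg hp, List.filter_cons, if_neg hp, hcast, hlist]
      exact ih (pre ++ [n])

theorem pv_bandB_aux (h : String → List Int) : ∀ (suf pre : List String) (cp : PySem.Set (String × String)),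
    (PySem.List.pyRange (pre.length : Int) ((pre ++ suf).length : Int) 1).foldl (fun pairs i =>
        if ((PySem.List.slice ((pre ++ suf).map h) none (some i)).contains
              (PySem.List.pyGetD ((pre ++ suf).map h) i [])) = false then
          pvEmitB pairs (((PySem.List.pyRange i ((pre ++ suf).length : Int) 1).filter (fun j =>
            PySem.List.pyGetD ((pre ++ suf).map h) j [] == PySem.List.pyGetD ((pre ++ suf).map h) i [])).map (fun j =>
              PySem.List.pyGetD (pre ++ suf) j ""))
        else pairs) cp
      = (pvGroups h pre suf).foldl pvEmitB cp := by
  intro suf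
  induction suf with
  | nil =>
    intro pre cp
    rw [PySem.List.pyRange_one_eq_nil (by simp)]
    rfl
  | cons n rest ih =>
    intro pre cp
    have hlt : (pre.length : Int) < ((pre ++ n :: rest).length : Int) := by
      simp
    rw [PySem.List.pyRange_one_cons hlt, List.foldl_cons]
    have hgetk : PySem.List.pyGetD ((pre ++ n :: rest).map h) (pre.length : Int) [] = h n := by
      rw [PySem.List.pyGetD_natCast, show (pre ++ n :: rest).map h = pre.map h ++ h n :: rest.map h from by simp,
        show pre.length = (pre.map h).length from by simp]
      exact pv_getD_mid _ _ _ _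
    have hslice : PySem.List.slice ((pre ++ n :: rest).map h) none (some (pre.length : Int)) = pre.map h := by
      rw [PySem.List.slice_to_natCast, show (pre ++ n :: rest).map h = pre.map h ++ h n :: rest.map h from by simp,
        show pre.length = (pre.map h).length from by simp]
      exact List.take_left
    have hlist : pre ++ n :: rest = (pre ++ [n]) ++ rest := by simp
    have hcast : (pre.length : Int) + 1 = ((pre ++ [n]).length : Int) := by simp
    rw [hgetk, hslice, pvGroups]
    by_cases hc : (pre.map h).contains (h n) = true
    · have hne : ¬((pre.map h).contains (h n) = false) := by rw [hc]; decide
      rw [if_neg hne, if_pos hc, ← ih (pre ++ [n]) cp, hcast, hlist]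
    · have hcf : (pre.map h).contains (h n) = false := by
        cases hb : (pre.map h).contains (h n)
        · rfl
        · exact absurd hb hc
      rw [if_pos hcf, if_neg hc, List.foldl_cons]
      have hgrp : (((PySem.List.pyRange (pre.length : Int) ((pre ++ n :: rest).length : Int) 1).filter (fun j =>
            PySem.List.pyGetD ((pre ++ n :: rest).map h) j [] == h n)).map (fun j =>
              PySem.List.pyGetD (pre ++ n :: rest) j ""))
          = n :: rest.filter (fun m => h m == h n) := by
        rw [pv_idx h (fun c => c == h n) (n :: rest) pre, List.filter_cons, if_pos (by simp)]
      rw [hgrp, ← ih (pre ++ [n]) _, hcast, hlist]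

-- A's band dict, characterized: buckets in first-key order, members in name order
theorem pv_band_values (ns : List String) (h : String → List Int) :
    (pvBuild (ns.map (fun n => (h n, n))) PySem.Dict.empty).values
      = (PySem.Set.ofList (ns.map h)).map (fun c => ns.filter (fun n => h n == c)) := by
  have hnd : (pvBuild (ns.map (fun n => (h n, n))) PySem.Dict.empty).keys.Nodup :=
    PySem.Dict.nodup_keys_foldl_modify_key (ns.map (fun n => (h n, n))) (fun p => p.1) []
      (fun _ p bl => bl ++ [p.2]) PySem.Dict.empty PySem.Dict.nodup_keys_empty
  rw [PySem.Dict.values_eq_map_keys _ hnd []]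
  have hkeys : (pvBuild (ns.map (fun n => (h n, n))) PySem.Dict.empty).keys
      = PySem.Set.ofList (ns.map h) := by
    have h1 : (pvBuild (ns.map (fun n => (h n, n))) PySem.Dict.empty).keys
        = PySem.Set.update PySem.Dict.empty.keys ((ns.map (fun n => (h n, n))).map (fun p => p.1)) :=
      PySem.Dict.keys_foldl_modify_key (ns.map (fun n => (h n, n))) (fun p => p.1) []
        (fun _ p bl => bl ++ [p.2]) PySem.Dict.empty
    rw [h1]
    have h2 : (ns.map (fun n => (h n, n))).map (fun p => p.1) = ns.map h := by
      simp [List.map_map]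
    rw [h2, show (PySem.Dict.empty : PySem.Dict (List Int) (List String)).keys = [] from rfl,
      PySem.Set.update_nil_left]
  rw [hkeys]
  apply List.map_congr_left
  intro c _
  have hgd : (pvBuild (ns.map (fun n => (h n, n))) PySem.Dict.empty).getD c []
      = PySem.Dict.empty.getD c [] ++ ((ns.map (fun n => (h n, n))).filter (fun p => p.1 == c)).map (fun p => p.2) :=
    PySem.Dict.getD_foldl_modify_append (ns.map (fun n => (h n, n))) PySem.Dict.empty c
  rw [hgd]
  simp [List.filter_map, Function.comp_def, List.map_map, PySem.Dict.getD_empty]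

theorem pv_emitA_eq_comb (bucket : List String) (cp : PySem.Set (String × String)) :
    pvEmitA cp bucket = (pvComb2 bucket).foldl (fun cp pair => PySem.Set.add cp (pvSortPair pair)) cp := by
  match bucket with
  | [] => simp [pvEmitA, pvComb2]
  | [x] => simp [pvEmitA, pvComb2]
  | x :: y :: t => simp [pvEmitA]

theorem pv_emit_aux :
    ∀ (l pre : List String) (cp : PySem.Set (String × String)),
      (PySem.List.enumerate l (pre.length : Int)).foldl (fun cp p =>
          (PySem.List.slice (pre ++ l) (some (p.1 + 1)) none).foldl (fun cp y =>
            PySem.Set.add cp (if p.2 ≤ y then (p.2, y) else (y, p.2))) cp) cp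
        = (pvComb2 l).foldl (fun cp pair => PySem.Set.add cp (pvSortPair pair)) cp := by
  intro l
  induction l with
  | nil => intro pre cp; simp [PySem.List.enumerate, pvComb2]
  | cons x xs ih =>
    intro pre cp
    rw [PySem.List.enumerate_cons, List.foldl_cons]
    have hlist : pre ++ x :: xs = (pre ++ [x]) ++ xs := by simp
    have hidx : (pre.length : Int) + 1 = (((pre ++ [x]).length : Nat) : Int) := by
      simp
    have hsl : PySem.List.slice (pre ++ x :: xs) (some ((pre.length : Int) + 1)) none = xs := by
      rw [hidx, PySem.List.slice_from_natCast, hlist]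
      exact List.drop_left ..
    rw [hsl]
    have hbody : (fun (cp : PySem.Set (String × String)) y =>
        PySem.Set.add cp (if x ≤ y then (x, y) else (y, x)))
        = fun cp y => PySem.Set.add cp (pvSortPair (x, y)) := by
      funext cp y
      simp [pvSortPair]
    rw [hbody]
    simp only [pvComb2, List.foldl_append, List.foldl_map]
    rw [hlist, hidx]
    exact ih (pre ++ [x]) _

theorem pv_emitB_eq_comb (bucket : List String) (cp : PySem.Set (String × String)) :
    pvEmitB cp bucket = (pvComb2 bucket).foldl (fun cp pair => PySem.Set.add cp (pvSortPair pair)) cp := by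
  have := pv_emit_aux bucket [] cp
  simpa [pvEmitB] using this

theorem pv_emit_eq : pvEmitB = pvEmitA := by
  funext cp bucket
  rw [pv_emitB_eq_comb, pv_emitA_eq_comb]

theorem pv_band (h : String → List Int) (ns : List String) (cp : PySem.Set (String × String)) :
    pvBandB h ns cp = ((pvBuild (ns.map (fun n => (h n, n))) PySem.Dict.empty).values).foldl pvEmitA cp := by
  have haux := pv_bandB_aux h ns [] cp
  simp only [List.nil_append, List.length_nil, Nat.cast_zero, List.map_nil] at haux
  rw [pv_band_values]
  have hof : PySem.Set.ofList (ns.map h) = pvFresh [] (ns.map h) := by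
    rw [← PySem.Set.update_nil_left, pv_update_fresh]
    simp
  have hgf := pv_groups_fresh h ns []
  simp only [List.map_nil] at hgf
  rw [hof, ← hgf, ← pv_emit_eq, ← haux]
  rfl

theorem pv_portA_eq (s : List (String × List Int)) (b r : Int) :
    lsh_candidate_pairs s b r
      = (PySem.List.pyRange 0 b 1).foldl (fun cp k =>
          ((pvBuild ((PySem.Set.ofList (s.map (fun p => p.1))).map (fun n =>
              (PySem.List.slice ((List.lookup n s).getD []) (some (k * r)) (some (k * r + r)), n)))
            PySem.Dict.empty).values).foldl pvEmitA cp) [] := by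
  simp only [lsh_candidate_pairs, pvBuild, List.foldl_map]
  rfl

theorem pv_portB_eq (s : List (String × List Int)) (b r : Int) :
    lsh_candidate_pairs_alt s b r
      = (PySem.List.pyRange 0 b 1).foldl (fun cp k =>
          pvBandB (fun n => PySem.List.slice ((List.lookup n s).getD []) (some (k * r)) (some (k * r + r)))
            (PySem.Set.ofList (s.map (fun p => p.1))) cp) [] := by
  simp only [lsh_candidate_pairs_alt, pvBandB, pvEmitB]
  rfl

theorem pv_main (s : List (String × List Int)) (b r : Int) :
    lsh_candidate_pairs s b r = lsh_candidate_pairs_alt s b r := by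
  rw [pv_portA_eq, pv_portB_eq]
  congr 1
  funext cp k
  rw [pv_band]

-- ===== VERDICT (by name: the statement is the Claim_ definition above) =====
theorem lsh_candidate_pairs_spec : Claim_equal_lsh_candidate_pairs := by
  intro s b r _ _
  exact pv_main s b r
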